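-- pv_equiv track=rewrite | github.com/itdinesh/lotapp-prod | pattern_engine.py | follow_fixed_sequence
-- ===== SOURCE A (Python) =====
-- def follow_fixed_sequence(seq, digits):
--     if len(seq) < digits + 1:
--         return None, None, None
--
--     base = seq[-digits:]
--     L = digits
--
--     for i in range(len(seq) - L - 1):
--         if seq[i:i + L] == base:
--             full_before = seq[:i + L]
--             before = full_before[-5:]     # last 5 only
--
--             full_after = seq[i + L:]
--             after = full_after[:5]        # first 5 only
--
--             return before, base, after
--
--     return None, None, None
-- ===== SOURCE B (Python) =====
-- _M = 1000000007
-- _B = 1000003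
--
--
-- def follow_fixed_sequence(seq, digits):
--     # Staged Rabin-Karp: stage 1 precomputes the list of rolling window hashes,
--     # stage 2 finds the first verified hit index, stage 3 builds the triple once.
--     n = len(seq)
--     if n < digits + 1:
--         return None, None, None
--     L = digits
--     base = seq[n - L:]
--     target = 0
--     for x in base:
--         target = (target * _B + x) % _M
--     pw = pow(_B, L - 1, _M)
--     h = 0
--     for x in seq[:L]:
--         h = (h * _B + x) % _M
--     m = n - L - 1
--     hs = []
--     for i in range(m):
--         hs.append(h)
--         h = ((h - seq[i] * pw) * _B + seq[i + L]) % _M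
--     idx = next((i for i in range(m) if hs[i] == target and seq[i:i + L] == base), None)
--     if idx is None:
--         return None, None, None
--     j = idx + L
--     return seq[max(0, j - 5):j], base, seq[j:j + 5]
-- ===== Notes on version B (the rewrite author's own statement) =====
-- stated objective: alternative
-- what changed: Replaces A's single scan with inline slice comparisons by a staged Rabin-Karp pipeline: precompute the list of rolling window hashes, find the first hash-verified hit index, then build the before/base/after triple once from that index with direct bounded slices.
-- outside the precondition, e.g. on follow_fixed_sequence([1, 2, 3], 0): A returns (None, None, None), B returns ([], [], [1, 2, 3]); on follow_fixed_sequence([7], -2): A returns ([], [], [7]), B raises IndexError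
import Mathlib
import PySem

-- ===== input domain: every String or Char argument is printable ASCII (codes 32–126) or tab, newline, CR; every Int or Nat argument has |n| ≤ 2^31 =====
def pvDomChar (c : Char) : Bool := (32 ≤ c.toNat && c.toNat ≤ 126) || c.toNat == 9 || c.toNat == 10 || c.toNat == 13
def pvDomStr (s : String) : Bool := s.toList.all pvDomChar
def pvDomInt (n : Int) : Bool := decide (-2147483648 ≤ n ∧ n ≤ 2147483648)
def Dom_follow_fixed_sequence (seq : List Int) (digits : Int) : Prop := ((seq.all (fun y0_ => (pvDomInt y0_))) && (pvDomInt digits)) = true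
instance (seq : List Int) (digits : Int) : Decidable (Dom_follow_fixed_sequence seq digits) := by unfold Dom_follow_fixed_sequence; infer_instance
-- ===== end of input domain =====

-- B replaces A's single scan with inline slice comparisons by a staged Rabin-Karp search:
-- it precomputes the list of rolling window hashes, then finds the first verified hit index,
-- then builds the result triple once from that index (objective: alternative algorithm; the
-- Python triple return is the 3-element list [before?, base?, after?]).

-- ===== PORT A =====
-- the for-loop with early return, as recursion on the index i toward the bound m
def aGo (seq base : List Int) (L m i : Int) : List (Option (List Int)) :=
  if hlt : i < m then
    if PySem.List.slice seq (some i) (some (i + L)) = base then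
      [some (PySem.List.slice (PySem.List.slice seq none (some (i + L))) (some (-5)) none),
       some base,
       some (PySem.List.slice (PySem.List.slice seq (some (i + L)) none) none (some 5))]
    else aGo seq base L m (i + 1)
  else [none, none, none]
termination_by (m - i).toNat
decreasing_by omega

def follow_fixed_sequence (seq : List Int) (digits : Int) : List (Option (List Int)) :=
  if (seq.length : Int) < digits + 1 then [none, none, none]
  else
    let base := PySem.List.slice seq (some (-digits)) none
    aGo seq base digits ((seq.length : Int) - digits - 1) 0

-- ===== PORT B =====
def hashStep (h x : Int) : Int := PySem.Int.mod (h * 1000003 + x) 1000000007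

def polyHash (xs : List Int) : Int := xs.foldl hashStep 0

-- stage 1: the list of rolling hashes hs[i] = hash of seq[i:i+L], i = 0 .. m-1
def hsBuild (seq : List Int) (L pw m i h : Int) (acc : List Int) : List Int :=
  if _hlt : i < m then
    hsBuild seq L pw m (i + 1)
      (PySem.Int.mod ((h - PySem.List.pyGetD seq i 0 * pw) * 1000003 + PySem.List.pyGetD seq (i + L) 0) 1000000007)
      (acc ++ [h])
  else acc
termination_by (m - i).toNat
decreasing_by omega

-- stage 2: first index i with hs[i] = target whose window verifies against base
def bFind (seq base : List Int) (L target : Int) : List Int → Int → Option Int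
  | [], _ => none
  | h :: t, i =>
      if h = target ∧ PySem.List.slice seq (some i) (some (i + L)) = base then some i
      else bFind seq base L target t (i + 1)

-- stage 3: build the triple once from the found index (j = idx + L)
def bResult (seq base : List Int) (L : Int) : Option Int → List (Option (List Int))
  | none => [none, none, none]
  | some idx =>
      [some (PySem.List.slice seq (some (max 0 (idx + L - 5))) (some (idx + L))),
       some base,
       some (PySem.List.slice seq (some (idx + L)) (some (idx + L + 5)))]

def follow_fixed_sequence_alt (seq : List Int) (digits : Int) : List (Option (List Int)) :=
  if (seq.length : Int) < digits + 1 then [none, none, none]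
  else
    let n : Int := (seq.length : Int)
    let base := PySem.List.slice seq (some (n - digits)) none
    let target := polyHash base
    let pw := PySem.Int.powMod 1000003 (digits - 1).toNat 1000000007
    let h0 := polyHash (PySem.List.slice seq none (some digits))
    let hs := hsBuild seq digits pw (n - digits - 1) 0 h0 []
    bResult seq base digits (bFind seq base digits target hs 0)

-- ===== PRECONDITION & SPEC =====
-- Pre_ excludes digits ≤ 0 (a nonpositive block length is outside the function's natural domain:
-- there A's value is an artefact of Python's negative-slice arithmetic, and B's pow(_B, digits-1, _M)
-- would compute a modular inverse instead).
def Pre_follow_fixed_sequence (seq : List Int) (digits : Int) : Prop := 1 ≤ digits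
instance (seq : List Int) (digits : Int) : Decidable (Pre_follow_fixed_sequence seq digits) := by
  unfold Pre_follow_fixed_sequence; infer_instance

def pvWitness_follow_fixed_sequence : List Int × Int := ([1, 2, 1, 2], 1)

def Spec_follow_fixed_sequence (seq : List Int) (digits : Int) (out : List (Option (List Int))) : Prop := out = follow_fixed_sequence_alt seq digits
instance (seq : List Int) (digits : Int) (out : List (Option (List Int))) : Decidable (Spec_follow_fixed_sequence seq digits out) := by unfold Spec_follow_fixed_sequence; infer_instance

-- ===== CLAIM (what is proved, stated in full; the proofs are below) =====
def Claim_equal_follow_fixed_sequence : Prop := ∀ (seq : List Int) (digits : Int), Dom_follow_fixed_sequence seq digits → Pre_follow_fixed_sequence seq digits → Spec_follow_fixed_sequence seq digits (follow_fixed_sequence seq digits)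

-- ===== LEMMAS AND PROOFS =====

-- the unreduced polynomial hash
def rawStep (h x : Int) : Int := h * 1000003 + x
def rawHash (xs : List Int) : Int := xs.foldl rawStep 0

lemma hashStep_emod (h x : Int) : hashStep h x = (h * 1000003 + x) % 1000000007 :=
  PySem.Int.mod_eq_emod_of_pos (by norm_num)

lemma foldl_hash_emod (xs : List Int) :
    ∀ a : Int, xs.foldl hashStep (a % 1000000007) = (xs.foldl rawStep a) % 1000000007 := by
  induction xs with
  | nil => intro a; simp
  | cons x t ih =>
    intro a
    show t.foldl hashStep (hashStep (a % 1000000007) x) = (t.foldl rawStep (rawStep a x)) % 1000000007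
    rw [hashStep_emod]
    have h1 : ((a % 1000000007) * 1000003 + x) % 1000000007
        = (a * 1000003 + x) % 1000000007 :=
      Int.ModEq.add_right x (Int.ModEq.mul_right 1000003 (Int.emod_emod_of_dvd a dvd_rfl))
    rw [h1, ← hashStep_emod, ]
    have := ih (a * 1000003 + x)
    rw [hashStep_emod]
    simpa [rawStep] using this

lemma polyHash_emod (xs : List Int) : polyHash xs = rawHash xs % 1000000007 := by
  have := foldl_hash_emod xs 0
  simpa [polyHash, rawHash] using this

lemma raw_foldl_shift (t : List Int) :
    ∀ a : Int, t.foldl rawStep a = a * 1000003 ^ t.length + rawHash t := by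
  induction t with
  | nil => intro a; simp [rawHash]
  | cons x t ih =>
    intro a
    show t.foldl rawStep (rawStep a x) = a * 1000003 ^ (t.length + 1) + rawHash (x :: t)
    have hx : rawHash (x :: t) = t.foldl rawStep (rawStep 0 x) := rfl
    rw [ih (rawStep a x), hx, ih (rawStep 0 x)]
    simp only [rawStep]
    ring

lemma rawHash_cons (x : Int) (t : List Int) :
    rawHash (x :: t) = x * 1000003 ^ t.length + rawHash t := by
  have hx : rawHash (x :: t) = t.foldl rawStep (rawStep 0 x) := rfl
  rw [hx, raw_foldl_shift]
  simp [rawStep]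

lemma rawHash_append (t : List Int) (z : Int) :
    rawHash (t ++ [z]) = rawHash t * 1000003 + z := by
  simp [rawHash, List.foldl_append, rawStep]

lemma window_succ (seq : List Int) (j K : Nat) (hjL : j + (K + 1) < seq.length) :
    (seq.drop (j + 1)).take (K + 1)
      = ((seq.drop j).take (K + 1)).tail ++ [seq[j + (K + 1)]'hjL] := by
  have hj : j < seq.length := by omega
  rw [List.drop_eq_getElem_cons hj, List.take_succ_cons, List.tail_cons]
  rw [List.take_add_one]
  congr 1
  have h2 : (seq.drop (j + 1))[K]? = some (seq[j + (K + 1)]'hjL) := by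
    rw [List.getElem?_drop]
    have : j + 1 + K = j + (K + 1) := by omega
    rw [this]
    exact List.getElem?_eq_getElem hjL
  rw [h2]
  rfl

lemma tail_window_length (seq : List Int) (j K : Nat) (hjL : j + (K + 1) < seq.length) :
    (((seq.drop j).take (K + 1)).tail).length = K := by
  have hj : j < seq.length := by omega
  rw [List.drop_eq_getElem_cons hj, List.take_succ_cons, List.tail_cons]
  simp [List.length_take, List.length_drop]
  omega

-- the rolling update preserves the window-hash invariant
lemma roll_inv (seq : List Int) (L i : Int) (hL : 1 ≤ L) (hi : 0 ≤ i)
    (hr : i + L < (seq.length : Int)) :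
    PySem.Int.mod ((polyHash ((seq.drop i.toNat).take L.toNat)
        - PySem.List.pyGetD seq i 0 * PySem.Int.powMod 1000003 (L - 1).toNat 1000000007) * 1000003
        + PySem.List.pyGetD seq (i + L) 0) 1000000007
      = polyHash ((seq.drop (i.toNat + 1)).take L.toNat) := by
  have hLK : (L - 1).toNat = L.toNat - 1 := by omega
  obtain ⟨K, hK⟩ : ∃ K, L.toNat = K + 1 := ⟨L.toNat - 1, by omega⟩
  rw [hLK, hK]
  simp only [Nat.add_sub_cancel]
  set j := i.toNat with hj
  have hjL : j + (K + 1) < seq.length := by omega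
  have hx : PySem.List.pyGetD seq i 0 = seq[j]'(by omega) :=
    PySem.List.pyGetD_eq_getElem seq 0 hi (by omega)
  have hz : PySem.List.pyGetD seq (i + L) 0 = seq[j + (K + 1)]'hjL := by
    rw [PySem.List.pyGetD_eq_getElem seq 0 (by omega) (by omega)]
    congr 1
    omega
  set t := ((seq.drop j).take (K + 1)).tail with ht
  have hw : (seq.drop j).take (K + 1) = seq[j]'(by omega) :: t := by
    rw [ht, List.drop_eq_getElem_cons (by omega : j < seq.length),
      List.take_succ_cons, List.tail_cons]
  have htl : t.length = K := by
    rw [ht]; exact tail_window_length seq j K hjL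
  have hwin : (seq.drop (j + 1)).take (K + 1) = t ++ [seq[j + (K + 1)]'hjL] :=
    window_succ seq j K hjL
  rw [hx, hz, hwin, polyHash_emod, polyHash_emod, rawHash_append, hw, rawHash_cons, htl,
    PySem.Int.powMod_eq_emod _ _ (by norm_num),
    PySem.Int.mod_eq_emod_of_pos (by norm_num)]
  set M : Int := 1000000007
  set B : Int := 1000003
  set x := seq[j]'(by omega : j < seq.length)
  set r := rawHash t
  have c1 : (x * B ^ K + r) % M ≡ x * B ^ K + r [ZMOD M] :=
    Int.emod_emod_of_dvd _ dvd_rfl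
  have c2 : (B ^ K % M : Int) ≡ B ^ K [ZMOD M] := Int.emod_emod_of_dvd _ dvd_rfl
  have c3 : ((x * B ^ K + r) % M - x * (B ^ K % M)) * B + seq[j + (K + 1)]'hjL
      ≡ (x * B ^ K + r - x * B ^ K) * B + seq[j + (K + 1)]'hjL [ZMOD M] :=
    Int.ModEq.add_right _ (Int.ModEq.mul_right B (Int.ModEq.sub c1 (Int.ModEq.mul_left x c2)))
  have e : x * B ^ K + r - x * B ^ K = r := by ring
  rw [e] at c3
  exact c3

-- the two "before" expressions agree: (seq[:j])[-5:] = seq[max(0,j-5):j] for 0 ≤ j < len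
lemma before_eq (seq : List Int) (j : Int) (h0 : 0 ≤ j) (hj : j < (seq.length : Int)) :
    PySem.List.slice (PySem.List.slice seq none (some j)) (some (-5)) none
      = PySem.List.slice seq (some (max 0 (j - 5))) (some j) := by
  rw [PySem.List.slice_to seq h0, PySem.List.slice_from_neg_ofNat _ 5 (by omega),
    PySem.List.slice_toNat seq (le_max_left 0 (j - 5)) h0]
  have hlen : (seq.take j.toNat).length = j.toNat := by
    simp [List.length_take]; omega
  rw [hlen, List.drop_take]
  have h1 : (max 0 (j - 5)).toNat = j.toNat - 5 := by omega
  rw [h1]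

-- the two "after" expressions agree: (seq[j:])[:5] = seq[j:j+5] for 0 ≤ j
lemma after_eq (seq : List Int) (j : Int) (h0 : 0 ≤ j) :
    PySem.List.slice (PySem.List.slice seq (some j) none) none (some 5)
      = PySem.List.slice seq (some j) (some (j + 5)) := by
  rw [PySem.List.slice_from seq h0, PySem.List.slice_to _ (by norm_num),
    PySem.List.slice_toNat seq h0 (by omega)]
  congr 1
  omega

-- the accumulator form of stage 1 is the accumulator prepended to the pure list
lemma hsBuild_acc (seq : List Int) (L pw m : Int) :
    ∀ (k : Nat) (i h : Int) (acc : List Int), (m - i).toNat ≤ k →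
      hsBuild seq L pw m i h acc = acc ++ hsBuild seq L pw m i h [] := by
  intro k
  induction k with
  | zero =>
    intro i h acc hk
    have hnot : ¬ i < m := by omega
    rw [hsBuild, dif_neg hnot]
    conv_rhs => rw [hsBuild, dif_neg hnot]
    rw [List.append_nil]
  | succ k ih =>
    intro i h acc hk
    by_cases hi : i < m
    · rw [hsBuild, dif_pos hi]
      conv_rhs => rw [hsBuild, dif_pos hi]
      rw [ih _ _ (acc ++ [h]) (by omega), ih _ _ ([] ++ [h]) (by omega)]
      simp
    · rw [hsBuild, dif_neg hi]
      conv_rhs => rw [hsBuild, dif_neg hi]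
      rw [List.append_nil]

-- B's staged pipeline agrees with A's loop while the hash invariant holds
lemma stages_eq (seq base : List Int) (L target pw : Int) (hL : 1 ≤ L)
    (htarget : target = polyHash base)
    (hpw : pw = PySem.Int.powMod 1000003 (L - 1).toNat 1000000007) :
    ∀ (k : Nat) (i h : Int), 0 ≤ i → ((seq.length : Int) - L - 1) - i = (k : Int) →
      h = polyHash (PySem.List.slice seq (some i) (some (i + L))) →
      bResult seq base L
          (bFind seq base L target (hsBuild seq L pw ((seq.length : Int) - L - 1) i h []) i)
        = aGo seq base L ((seq.length : Int) - L - 1) i := by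
  intro k
  induction k with
  | zero =>
    intro i h hi hk hinv
    rw [hsBuild, aGo]
    rw [dif_neg (by omega), dif_neg (by omega)]
    rfl
  | succ k ih =>
    intro i h hi hk hinv
    rw [hsBuild, aGo]
    rw [dif_pos (by omega : i < (seq.length : Int) - L - 1),
        dif_pos (by omega : i < (seq.length : Int) - L - 1),
      List.nil_append,
      hsBuild_acc seq L pw ((seq.length : Int) - L - 1) k (i + 1) _ [h] (by omega),
      List.singleton_append]
    by_cases hbase : PySem.List.slice seq (some i) (some (i + L)) = base
    · rw [if_pos hbase]
      show bResult seq base L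
          (if _ ∧ _ then some i else _) = _
      rw [if_pos ⟨by rw [hinv, hbase, htarget], hbase⟩]
      show [some (PySem.List.slice seq (some (max 0 (i + L - 5))) (some (i + L))),
            some base,
            some (PySem.List.slice seq (some (i + L)) (some (i + L + 5)))] = _
      rw [before_eq seq (i + L) (by omega) (by omega), after_eq seq (i + L) (by omega)]
    · rw [if_neg hbase]
      show bResult seq base L
          (if _ ∧ _ then some i else bFind seq base L target _ (i + 1)) = _
      rw [if_neg (by intro hc; exact hbase hc.2)]
      apply ih
      · omega
      · omega
      · -- the rolled hash is the hash of the next window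
        have hsl : PySem.List.slice seq (some i) (some (i + L))
            = (seq.drop i.toNat).take L.toNat := by
          rw [PySem.List.slice_toNat seq hi (by omega)]
          congr 1
          omega
        have hsl' : PySem.List.slice seq (some (i + 1)) (some (i + 1 + L))
            = (seq.drop (i.toNat + 1)).take L.toNat := by
          rw [PySem.List.slice_toNat seq (by omega) (by omega)]
          congr 2
          · omega
          · omega
        rw [hinv, hsl, hsl', hpw]
        exact roll_inv seq L i hL hi (by omega)

-- ===== VERDICT (by name: the statement is the Claim_ definition above) =====
theorem follow_fixed_sequence_spec : Claim_equal_follow_fixed_sequence := by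
  intro seq digits _hdom hpre
  unfold Spec_follow_fixed_sequence follow_fixed_sequence follow_fixed_sequence_alt
  have hd : 1 ≤ digits := hpre
  by_cases hlen : (seq.length : Int) < digits + 1
  · rw [if_pos hlen, if_pos hlen]
  · rw [if_neg hlen, if_neg hlen]
    dsimp only
    have hbase : PySem.List.slice seq (some ((seq.length : Int) - digits)) none
        = PySem.List.slice seq (some (-digits)) none := by
      rw [PySem.List.slice_from seq (by omega), PySem.List.slice_some_none]
      congr 1
      simp only [PySem.List.clampIdx]
      split
      · split <;> omega
      · omega
    rw [hbase]
    symm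
    apply stages_eq seq _ digits _ _ hd rfl rfl ((seq.length : Int) - digits - 1).toNat 0 _ le_rfl
      (by omega)
    rw [PySem.List.slice_to seq (by omega), PySem.List.slice_toNat seq le_rfl (by omega)]
    simp
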